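-- pv_equiv track=rewrite | github.com/smar-01/data-retrieval | sharechangehandler.py | load_share_changes_total
-- ===== SOURCE A (Python) =====
-- def load_share_changes_total(portfolio_shares_total):
--     """
--     Calculates the daily changes in shares for each stock in the portfolio.
--
--     Args:
--         portfolio_shares_total (dict): A dictionary where the keys are stock names and the values
--                                        are dictionaries with dates as keys and the number of shares held on each day.
--
--     Returns:
--         dict: A dictionary where the keys are security names, and the values are dictionaries with dates as keys
--               and the daily change in security as # of securities changed (bought or sole). The first day will
--               always have a value of 0 since there is no previous day to compare to.
--     """
--
--     share_changes_total = {}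
--
--     # Loop through each equity in the portfolio
--     for equity, date_shares in portfolio_shares_total.items():
--         changes = {}
--         prev_value = None
--
--         # Loop through the dates and shares held on each day
--         for date, shares in date_shares.items():
--             if prev_value is not None:
--                 # Calculate the change in shares from the previous day
--                 changes[date] = shares - prev_value
--             else:
--                 # The first day does not have a previous day to compare to
--                 changes[date] = 0
--
--             prev_value = shares
--
--         # Add the changes dictionary to the result for this equity
--         share_changes_total[equity] = changes
--
--     return share_changes_total
-- ===== SOURCE B (Python) =====
-- def load_share_changes_total(portfolio_shares_total):
--     share_changes_total = {}
--     for equity, date_shares in portfolio_shares_total.items():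
--         dates = list(date_shares)
--         vals = list(date_shares.values())
--         changes = {}
--         if dates:
--             changes[dates[0]] = 0
--             for date, (prev, cur) in zip(dates[1:], zip(vals, vals[1:])):
--                 changes[date] = cur - prev
--         share_changes_total[equity] = changes
--     return share_changes_total
-- ===== Notes on version B (the rewrite author's own statement) =====
-- stated objective: idiomatic
-- what changed: Replaces A's prev_value-sentinel accumulator loop with a consecutive-pair traversal: the first date gets 0 up front, then each later date is paired with (prev, cur) from zip(vals, vals[1:]).
import Mathlib
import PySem

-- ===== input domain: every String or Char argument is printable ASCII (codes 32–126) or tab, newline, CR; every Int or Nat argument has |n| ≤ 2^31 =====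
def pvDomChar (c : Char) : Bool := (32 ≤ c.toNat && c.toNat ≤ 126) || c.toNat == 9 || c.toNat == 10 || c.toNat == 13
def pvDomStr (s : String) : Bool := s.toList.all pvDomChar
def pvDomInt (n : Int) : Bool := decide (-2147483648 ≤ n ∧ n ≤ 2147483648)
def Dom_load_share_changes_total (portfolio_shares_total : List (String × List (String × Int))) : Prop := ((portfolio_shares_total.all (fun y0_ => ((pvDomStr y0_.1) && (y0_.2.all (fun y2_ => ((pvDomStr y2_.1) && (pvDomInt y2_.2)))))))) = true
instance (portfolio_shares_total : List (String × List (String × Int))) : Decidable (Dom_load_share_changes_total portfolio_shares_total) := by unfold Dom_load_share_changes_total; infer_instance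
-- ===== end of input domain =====

-- B replaces A's prev_value-sentinel loop with a consecutive-pair (zip) traversal; same cost, more idiomatic.

-- ===== PORT A =====
-- inner loop of A: state = (changes so far, prev_value); branch order as in the Python
def pvAStep (st : List (String × Int) × Option Int) (p : String × Int) :
    List (String × Int) × Option Int :=
  match st.2 with
  | some pv => (st.1 ++ [(p.1, p.2 - pv)], some p.2)
  | none => (st.1 ++ [(p.1, (0 : Int))], some p.2)

def load_share_changes_total (portfolio_shares_total : List (String × List (String × Int))) : List (String × List (String × Int)) :=
  portfolio_shares_total.foldl
    (fun acc eq_ds => acc ++ [(eq_ds.1, (eq_ds.2.foldl pvAStep ([], none)).1)])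
    []

-- ===== PORT B =====
-- inner part of B: first date gets 0, then zip(dates[1:], zip(vals, vals[1:]))
def pvBInner (date_shares : List (String × Int)) : List (String × Int) :=
  let dates := date_shares.map Prod.fst
  let vals := date_shares.map Prod.snd
  match dates with
  | [] => []
  | d0 :: _ =>
    (d0, (0 : Int)) ::
      ((dates.drop 1).zip (vals.zip (vals.drop 1))).map
        (fun x => (x.1, x.2.2 - x.2.1))

def load_share_changes_total_alt (portfolio_shares_total : List (String × List (String × Int))) : List (String × List (String × Int)) :=
  portfolio_shares_total.map (fun eq_ds => (eq_ds.1, pvBInner eq_ds.2))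

-- ===== PRECONDITION & SPEC =====
def Spec_load_share_changes_total (portfolio_shares_total : List (String × List (String × Int))) (out : List (String × List (String × Int))) : Prop := out = load_share_changes_total_alt portfolio_shares_total
instance (portfolio_shares_total : List (String × List (String × Int))) (out : List (String × List (String × Int))) : Decidable (Spec_load_share_changes_total portfolio_shares_total out) := by unfold Spec_load_share_changes_total; infer_instance

-- ===== CLAIM (what is proved, stated in full; the proofs are below) =====
def Claim_equal_load_share_changes_total : Prop := ∀ (portfolio_shares_total : List (String × List (String × Int))), Dom_load_share_changes_total portfolio_shares_total → Spec_load_share_changes_total portfolio_shares_total (load_share_changes_total portfolio_shares_total)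

-- ===== LEMMAS AND PROOFS =====

-- reference form of the tail of one equity's changes, starting from previous value pv
def pvPairs (pv : Int) : List (String × Int) → List (String × Int)
  | [] => []
  | (d, v) :: t => (d, v - pv) :: pvPairs v t

theorem pvAStep_some (acc : List (String × Int)) (pv : Int) (ds : List (String × Int)) :
    (ds.foldl pvAStep (acc, some pv)).1 = acc ++ pvPairs pv ds := by
  induction ds generalizing acc pv with
  | nil => simp [pvPairs]
  | cons h t ih => simp [pvAStep, pvPairs, ih]

theorem pvB_pairs (pv : Int) (rest : List (String × Int)) :
    ((rest.map Prod.fst).zip ((pv :: rest.map Prod.snd).zip (rest.map Prod.snd))).map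
        (fun x => (x.1, x.2.2 - x.2.1)) = pvPairs pv rest := by
  induction rest generalizing pv with
  | nil => simp [pvPairs]
  | cons h t ih => simp [pvPairs, ih]

theorem pvInner_eq (ds : List (String × Int)) :
    (ds.foldl pvAStep ([], none)).1 = pvBInner ds := by
  cases ds with
  | nil => simp [pvBInner]
  | cons h t =>
    simp only [List.foldl_cons, pvAStep, pvBInner, List.map_cons, List.drop_one,
      List.tail_cons]
    rw [pvAStep_some]
    simp [pvB_pairs]

-- ===== VERDICT (by name: the statement is the Claim_ definition above) =====
theorem load_share_changes_total_spec : Claim_equal_load_share_changes_total := by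
  intro pst _
  unfold Spec_load_share_changes_total load_share_changes_total load_share_changes_total_alt
  rw [PySem.List.foldl_append_singleton_eq_map]
  simp [pvInner_eq]
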